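-- pv_equiv track=rewrite | github.com/syamilisn/AI-MachineLearning-Repo | aoStarAlgo.py | least_cost_group
-- ===== SOURCE A (Python) =====
-- def least_cost_group(and_nodes, or_nodes, marked):
--     node_wise_cost = {}
--     for node_pair in and_nodes:
--         if not node_pair[0] + node_pair[1] in marked:
--             cost = 0
--             cost = cost + heuristic(node_pair[0]) + heuristic(node_pair[1]) + 2
--             node_wise_cost[node_pair[0] + node_pair[1]] = cost
--     for node in or_nodes:
--         if not node in marked:
--             cost = 0
--             cost = cost + heuristic(node) + 1
--             node_wise_cost[node] = cost
--     min_cost = 999999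
--     min_cost_group = None
-- # Calculates the min heuristic
--     for costKey in node_wise_cost:
--         if node_wise_cost[costKey] < min_cost:
--             min_cost = node_wise_cost[costKey]
--             min_cost_group = costKey
--     return [min_cost, min_cost_group]
--
-- def heuristic(n):
--     return H_dist[n]
--
-- H_dist = { 'A': -1,'B': 4, 'C': 2, 'D': 3, 'E': 6,'F': 8, 'G': 2,'H': 0, 'I': 0, 'J': 0}
-- ===== SOURCE B (Python) =====
-- H_dist = {'A': -1, 'B': 4, 'C': 2, 'D': 3, 'E': 6, 'F': 8, 'G': 2, 'H': 0, 'I': 0, 'J': 0}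
--
--
-- def heuristic(n):
--     return H_dist[n]
--
--
-- def least_cost_group(and_nodes, or_nodes, marked):
--     # Collect unmarked (cost, key) candidates, then STABLE-sort by cost and take the
--     # first entry: stability makes the head exactly the first strictly-minimal group,
--     # reproducing A's and-before-or, strict-< running-min behaviour.
--     candidates = []
--     for a, b in and_nodes:
--         if a + b not in marked:
--             candidates.append((heuristic(a) + heuristic(b) + 2, a + b))
--     for n in or_nodes:
--         if n not in marked:
--             candidates.append((heuristic(n) + 1, n))
--     ordered = sorted(candidates, key=lambda t: t[0])
--     if ordered:
--         return [ordered[0][0], ordered[0][1]]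
--     return [999999, None]
-- ===== Notes on version B (the rewrite author's own statement) =====
-- stated objective: alternative
-- what changed: Replaces A's keyed cost dictionary plus a separate strict-< running-minimum key scan with sort-then-pick: build a flat (cost, key) candidate list, stable-sort it by cost, and return its first element (stability preserves A's and-before-or, first-minimal tie behaviour).
import Mathlib
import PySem

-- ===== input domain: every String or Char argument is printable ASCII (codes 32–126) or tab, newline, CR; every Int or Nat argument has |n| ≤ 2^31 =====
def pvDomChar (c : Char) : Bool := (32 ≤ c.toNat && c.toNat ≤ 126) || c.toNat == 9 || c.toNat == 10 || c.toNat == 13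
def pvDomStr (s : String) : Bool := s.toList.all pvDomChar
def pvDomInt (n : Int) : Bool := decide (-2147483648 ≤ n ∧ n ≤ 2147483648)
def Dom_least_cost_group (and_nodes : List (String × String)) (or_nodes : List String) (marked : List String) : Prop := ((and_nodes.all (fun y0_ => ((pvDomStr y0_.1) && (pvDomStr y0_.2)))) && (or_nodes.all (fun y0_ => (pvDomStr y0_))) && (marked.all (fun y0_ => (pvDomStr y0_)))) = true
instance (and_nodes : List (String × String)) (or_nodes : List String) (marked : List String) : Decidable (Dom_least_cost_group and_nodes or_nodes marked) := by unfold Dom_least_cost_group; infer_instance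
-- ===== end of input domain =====

-- B replaces A's keyed cost dictionary + strict-< running-minimum key scan with
-- sort-then-pick: a flat (cost, key) candidate list, stable-sorted by cost, head taken
-- (objective: alternative; stability preserves A's first-minimal tie behaviour).


-- ===== PORT A =====
def pvHdist : PySem.Dict String Int :=
  PySem.Dict.ofList [("A", -1), ("B", 4), ("C", 2), ("D", 3), ("E", 6),
                     ("F", 8), ("G", 2), ("H", 0), ("I", 0), ("J", 0)]

-- heuristic(n) = H_dist[n]; Python raises KeyError for a missing key, so Pre_ requires every
-- looked-up node to be a key of H_dist and the getD default 0 is never consulted inside Pre_.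
def pvHeuristic (n : String) : Int := pvHdist.getD n 0

def least_cost_group (and_nodes : List (String × String)) (or_nodes : List String) (marked : List String) : Int × Option String :=
  let d1 := and_nodes.foldl (fun d p =>
    if !(marked.contains (p.1 ++ p.2)) then
      d.insert (p.1 ++ p.2) (0 + pvHeuristic p.1 + pvHeuristic p.2 + 2)
    else d) PySem.Dict.empty
  let d2 := or_nodes.foldl (fun d n =>
    if !(marked.contains n) then d.insert n (0 + pvHeuristic n + 1) else d) d1
  d2.keys.foldl (fun acc k =>
    if d2.getD k 0 < acc.1 then (d2.getD k 0, some k) else acc)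
    ((999999 : Int), (none : Option String))

-- ===== PORT B =====
def least_cost_group_alt (and_nodes : List (String × String)) (or_nodes : List String) (marked : List String) : Int × Option String :=
  let cands1 := and_nodes.foldl (fun acc p =>
    if !(marked.contains (p.1 ++ p.2)) then
      acc ++ [(pvHeuristic p.1 + pvHeuristic p.2 + 2, p.1 ++ p.2)]
    else acc) ([] : List (Int × String))
  let cands := or_nodes.foldl (fun acc n =>
    if !(marked.contains n) then acc ++ [(pvHeuristic n + 1, n)] else acc) cands1
  match PySem.List.sorted cands (fun t => t.1) with
  | [] => ((999999 : Int), (none : Option String))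
  | t :: _ => (t.1, some t.2)

-- ===== PRECONDITION & SPEC =====
def pvLetters : List String := ["A", "B", "C", "D", "E", "F", "G", "H", "I", "J"]

-- Pre_ excludes exactly the inputs on which Python A raises KeyError: some unmarked node
-- (or a component of an unmarked and-pair) is not a key of H_dist.
def Pre_least_cost_group (and_nodes : List (String × String)) (or_nodes : List String) (marked : List String) : Prop :=
  (∀ p ∈ and_nodes, marked.contains (p.1 ++ p.2) = false → p.1 ∈ pvLetters ∧ p.2 ∈ pvLetters) ∧
  (∀ n ∈ or_nodes, marked.contains n = false → n ∈ pvLetters)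
instance (and_nodes : List (String × String)) (or_nodes : List String) (marked : List String) : Decidable (Pre_least_cost_group and_nodes or_nodes marked) := by unfold Pre_least_cost_group; infer_instance

def pvWitness_least_cost_group : (List (String × String)) × List String × List String :=
  ([("A", "B"), ("C", "D")], ["E", "H"], [])

def Spec_least_cost_group (and_nodes : List (String × String)) (or_nodes : List String) (marked : List String) (out : Int × Option String) : Prop := out = least_cost_group_alt and_nodes or_nodes marked
instance (and_nodes : List (String × String)) (or_nodes : List String) (marked : List String) (out : Int × Option String) : Decidable (Spec_least_cost_group and_nodes or_nodes marked out) := by unfold Spec_least_cost_group; infer_instance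

-- ===== CLAIM (what is proved, stated in full; the proofs are below) =====
def Claim_equal_least_cost_group : Prop := ∀ (and_nodes : List (String × String)) (or_nodes : List String) (marked : List String), Dom_least_cost_group and_nodes or_nodes marked → Pre_least_cost_group and_nodes or_nodes marked → Spec_least_cost_group and_nodes or_nodes marked (least_cost_group and_nodes or_nodes marked)

-- ===== LEMMAS AND PROOFS =====

-- the strict-< running-minimum step of A's final scan, on (cost, key) pairs
def pvStep (acc : Int × Option String) (t : Int × String) : Int × Option String :=
  if t.1 < acc.1 then (t.1, some t.2) else acc

-- the first-minimal pick (what both a strict-< scan and a stable sort's head compute)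
def pvPick (m x : Int × String) : Int × String := if x.1 < m.1 then x else m

-- swap a dict item (key, cost) into scan order (cost, key)
def pvSw (p : String × Int) : Int × String := (p.2, p.1)

-- values are consistent: equal keys carry equal costs
def pvConsistent (l : List (Int × String)) : Prop :=
  ∀ p ∈ l, ∀ q ∈ l, p.2 = q.2 → p.1 = q.1

lemma pvConsistent_mono {l l' : List (Int × String)} (h : pvConsistent l)
    (hsub : ∀ x ∈ l', x ∈ l) : pvConsistent l' :=
  fun p hp q hq => h p (hsub p hp) q (hsub q hq)

-- the head of the insertion-sort fold is the running first-minimum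
lemma pvFoldInsHead (l : List (Int × String)) (a : Int × String) (ys : List (Int × String)) :
    ∃ r, l.foldl (fun acc x =>
        PySem.List.insertBy (fun u v => decide (u.1 < v.1)) x acc) (a :: ys)
      = (l.foldl pvPick a) :: r := by
  induction l generalizing a ys with
  | nil => exact ⟨ys, rfl⟩
  | cons x t ih =>
    simp only [List.foldl_cons]
    by_cases hc : x.1 < a.1
    · have h1 : PySem.List.insertBy (fun u v => decide (u.1 < v.1)) x (a :: ys)
          = x :: a :: ys := by
        simp [PySem.List.insertBy, hc]
      have h2 : pvPick a x = x := by unfold pvPick; simp [hc]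
      rw [h1, h2]
      exact ih x (a :: ys)
    · have h1 : PySem.List.insertBy (fun u v => decide (u.1 < v.1)) x (a :: ys)
          = a :: PySem.List.insertBy (fun u v => decide (u.1 < v.1)) x ys := by
        simp [PySem.List.insertBy, hc]
      have h2 : pvPick a x = a := by unfold pvPick; simp [hc]
      rw [h1, h2]
      exact ih a _

lemma pvStepFold (t : List (Int × String)) (m : Int × String) :
    t.foldl pvStep (m.1, some m.2) = ((t.foldl pvPick m).1, some (t.foldl pvPick m).2) := by
  induction t generalizing m with
  | nil => rfl
  | cons x t ih =>
    have h : pvStep (m.1, some m.2) x = ((pvPick m x).1, some (pvPick m x).2) := by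
      unfold pvStep pvPick
      by_cases hc : x.1 < m.1 <;> simp [hc]
    rw [List.foldl_cons, h, ih, List.foldl_cons]

-- A's strict-< scan from the 999999 sentinel equals B's sort-then-head
lemma pvScanEqSorted (l : List (Int × String)) (h : ∀ t ∈ l, t.1 < 999999) :
    l.foldl pvStep ((999999 : Int), (none : Option String)) =
      (match PySem.List.sorted l (fun t => t.1) with
       | [] => ((999999 : Int), (none : Option String))
       | t :: _ => (t.1, some t.2)) := by
  cases l with
  | nil => rfl
  | cons x t =>
    have hdef : PySem.List.sorted (x :: t) (fun t => t.1)
        = t.foldl (fun acc y =>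
            PySem.List.insertBy (fun u v => decide (u.1 < v.1)) y acc) [x] :=
      PySem.List.sorted_eq_foldl_insertBy (x :: t) (fun t => t.1)
    obtain ⟨r, hr⟩ := pvFoldInsHead t x []
    rw [hdef, hr]
    have hx : x.1 < (999999 : Int) := h x (List.mem_cons_self)
    have h1 : pvStep ((999999 : Int), (none : Option String)) x = (x.1, some x.2) := by
      unfold pvStep; simp [hx]
    simp only [List.foldl_cons, h1]
    exact pvStepFold t x

lemma pvFoldFilterMap {α β γ : Type} (l : List α) (p : α → Bool) (f : α → γ)
    (g : β → γ → β) (init : β) :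
    l.foldl (fun d x => if p x then g d (f x) else d) init
      = ((l.filter p).map f).foldl g init := by
  induction l generalizing init with
  | nil => rfl
  | cons x t ih =>
    by_cases hx : p x = true
    · simp [hx, ih]
    · simp [hx, ih]

lemma pvFoldStepFstLe (l : List (Int × String)) (acc : Int × Option String) :
    (l.foldl pvStep acc).1 ≤ acc.1 ∧ ∀ x ∈ l, (l.foldl pvStep acc).1 ≤ x.1 := by
  induction l generalizing acc with
  | nil => simp
  | cons y t ih =>
    have hs : (pvStep acc y).1 ≤ acc.1 ∧ (pvStep acc y).1 ≤ y.1 := by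
      unfold pvStep; split <;> constructor <;> omega
    obtain ⟨h1, h2⟩ := ih (pvStep acc y)
    refine ⟨le_trans h1 hs.1, ?_⟩
    intro x hx
    rcases List.mem_cons.1 hx with rfl | hx
    · exact le_trans h1 hs.2
    · exact h2 x hx

lemma pvStep_no (acc : Int × Option String) (t : Int × String) (h : acc.1 ≤ t.1) :
    pvStep acc t = acc := by
  unfold pvStep; rw [if_neg (by omega)]

-- the crux for A's side: scanning the dict built from the (cost, key) entries equals
-- scanning the raw entries, provided equal keys always carry equal costs
lemma pvDictScan (entries : List (Int × String)) (d : PySem.Dict String Int)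
    (acc : Int × Option String) (hnd : d.keys.Nodup)
    (hcons : pvConsistent (d.items.map pvSw ++ entries)) :
    ((entries.foldl (fun d t => d.insert t.2 t.1) d).items.map pvSw).foldl pvStep acc
      = (d.items.map pvSw ++ entries).foldl pvStep acc := by
  induction entries generalizing d acc with
  | nil => simp
  | cons e rest ih =>
    simp only [List.foldl_cons]
    by_cases hc : d.contains e.2 = true
    · -- key already present: the dict is unchanged, and the later duplicate entry
      -- (same key, hence same cost) never updates the strict-< scan
      have hkmem : e.2 ∈ d.keys := (PySem.Dict.contains_iff_mem_keys d e.2).1 hc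
      have hkm : e.2 ∈ d.items.map Prod.fst := by
        simpa [PySem.Dict.keys] using hkmem
      obtain ⟨q, hq, hq1⟩ := List.mem_map.1 hkm
      have hq' : (q.2, q.1) ∈ d.items.map pvSw ++ (e :: rest) :=
        List.mem_append_left _ (List.mem_map.2 ⟨q, hq, rfl⟩)
      have he' : e ∈ d.items.map pvSw ++ (e :: rest) :=
        List.mem_append_right _ (List.mem_cons_self)
      have hv : q.2 = e.1 := hcons (q.2, q.1) hq' e he' (by simpa using hq1)
      have hmem : (e.2, e.1) ∈ d.items := by
        have : q = (e.2, e.1) := by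
          cases q; simp_all
        rwa [this] at hq
      have hitems : (d.insert e.2 e.1).items = d.items := by
        rw [PySem.Dict.items_insert_of_contains d e.1 hc]
        have hid : ∀ q ∈ d.items, (if q.1 == e.2 then (e.2, e.1) else q) = q := by
          intro q hqmem
          by_cases hqe : q.1 == e.2
          · have hqk : q.1 = e.2 := by simpa using hqe
            have hq2 : q.2 = e.1 :=
              hcons (q.2, q.1) (List.mem_append_left _ (List.mem_map.2 ⟨q, hqmem, rfl⟩))
                e he' (by simpa using hqk)
            simp [hqe]
            cases q; simp_all
          · simp [hqe]
        rw [List.map_congr_left hid]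
        simp
      have hnd' : (d.insert e.2 e.1).keys.Nodup := PySem.Dict.nodup_keys_insert _ _ _ hnd
      have hcons' : pvConsistent ((d.insert e.2 e.1).items.map pvSw ++ rest) := by
        apply pvConsistent_mono hcons
        intro x hx
        rw [hitems] at hx
        rcases List.mem_append.1 hx with hx | hx
        · exact List.mem_append_left _ hx
        · exact List.mem_append_right _ (List.mem_cons_of_mem _ hx)
      rw [ih (d.insert e.2 e.1) acc hnd' hcons', hitems]
      -- remove the duplicate entry e from the scan
      have hsplit : d.items.map pvSw ++ e :: rest = (d.items.map pvSw ++ [e]) ++ rest := by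
        simp
      rw [hsplit]
      simp only [List.foldl_append]
      have hmem' : e ∈ d.items.map pvSw :=
        List.mem_map.2 ⟨(e.2, e.1), hmem, rfl⟩
      have hle := (pvFoldStepFstLe (d.items.map pvSw) acc).2 e hmem'
      have hskip : List.foldl pvStep (List.foldl pvStep acc (d.items.map pvSw)) [e]
          = List.foldl pvStep acc (d.items.map pvSw) := by
        simp only [List.foldl_cons, List.foldl_nil]
        exact pvStep_no _ _ hle
      rw [hskip]
    · -- fresh key: the insert appends, the lists coincide
      have hc' : d.contains e.2 = false := by simpa using hc
      have hitems : (d.insert e.2 e.1).items = d.items ++ [(e.2, e.1)] :=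
        PySem.Dict.items_insert_of_not_contains d e.1 hc'
      have hnd' : (d.insert e.2 e.1).keys.Nodup := PySem.Dict.nodup_keys_insert _ _ _ hnd
      have hmap : (d.insert e.2 e.1).items.map pvSw = d.items.map pvSw ++ [e] := by
        rw [hitems]; simp [pvSw]
      have hcons' : pvConsistent ((d.insert e.2 e.1).items.map pvSw ++ rest) := by
        apply pvConsistent_mono hcons
        intro x hx
        rw [hmap] at hx
        rcases List.mem_append.1 hx with hx | hx
        · rcases List.mem_append.1 hx with hx | hx
          · exact List.mem_append_left _ hx
          · have hxe : x = e := by simpa using hx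
            subst hxe
            exact List.mem_append_right _ (List.mem_cons_self)
        · exact List.mem_append_right _ (List.mem_cons_of_mem _ hx)
      rw [ih (d.insert e.2 e.1) acc hnd' hcons', hmap]
      simp

lemma pvHeurBound (s : String) (h : s ∈ pvLetters) :
    -1 ≤ pvHeuristic s ∧ pvHeuristic s ≤ 8 := by
  fin_cases h <;> decide

lemma pvLetterChar (s : String) (h : s ∈ pvLetters) : ∃ c, s.toList = [c] := by
  fin_cases h <;> exact ⟨_, rfl⟩

lemma pvKeyInj {a b a' b' : String} (ha : ∃ c, a.toList = [c]) (hb : ∃ c, b.toList = [c])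
    (ha' : ∃ c, a'.toList = [c]) (hb' : ∃ c, b'.toList = [c])
    (h : a ++ b = a' ++ b') : a = a' ∧ b = b' := by
  obtain ⟨ca, ha⟩ := ha; obtain ⟨cb, hb⟩ := hb
  obtain ⟨ca', ha'⟩ := ha'; obtain ⟨cb', hb'⟩ := hb'
  have ht := congrArg String.toList h
  rw [String.toList_append, String.toList_append, ha, hb, ha', hb'] at ht
  simp only [List.cons_append, List.nil_append, List.cons.injEq, and_true] at ht
  constructor
  · apply String.toList_inj.1; rw [ha, ha', ht.1]
  · apply String.toList_inj.1; rw [hb, hb', ht.2]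

lemma pvKeyLen {a b n : String} (ha : ∃ c, a.toList = [c]) (hb : ∃ c, b.toList = [c])
    (hn : ∃ c, n.toList = [c]) : a ++ b ≠ n := by
  obtain ⟨ca, ha⟩ := ha; obtain ⟨cb, hb⟩ := hb; obtain ⟨cn, hn⟩ := hn
  intro h
  have ht := congrArg String.toList h
  rw [String.toList_append, ha, hb, hn] at ht
  simp at ht

-- characterise membership in the candidate list
lemma pvCandMem (and_nodes : List (String × String)) (or_nodes : List String)
    (marked : List String) (t : Int × String)
    (ht : t ∈ (and_nodes.filter (fun p => !(marked.contains (p.1 ++ p.2)))).map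
        (fun p => (pvHeuristic p.1 + pvHeuristic p.2 + 2, p.1 ++ p.2))
      ++ (or_nodes.filter (fun n => !(marked.contains n))).map
        (fun n => (pvHeuristic n + 1, n))) :
    (∃ p, p ∈ and_nodes ∧ marked.contains (p.1 ++ p.2) = false ∧
        t = (pvHeuristic p.1 + pvHeuristic p.2 + 2, p.1 ++ p.2)) ∨
    (∃ n, n ∈ or_nodes ∧ marked.contains n = false ∧ t = (pvHeuristic n + 1, n)) := by
  rcases List.mem_append.1 ht with hx | hx
  · obtain ⟨p, hp, hpt⟩ := List.mem_map.1 hx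
    obtain ⟨hp1, hp2⟩ := List.mem_filter.1 hp
    exact Or.inl ⟨p, hp1, by simpa using hp2, hpt.symm⟩
  · obtain ⟨n, hn, hnt⟩ := List.mem_map.1 hx
    obtain ⟨hn1, hn2⟩ := List.mem_filter.1 hn
    exact Or.inr ⟨n, hn1, by simpa using hn2, hnt.symm⟩

-- ===== VERDICT (by name: the statement is the Claim_ definition above) =====
theorem least_cost_group_spec : Claim_equal_least_cost_group := by
  intro and_nodes or_nodes marked _hdom hpre
  obtain ⟨hand, hor⟩ := hpre
  unfold Spec_least_cost_group least_cost_group least_cost_group_alt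
  simp only [zero_add]
  set candsA : List (Int × String) :=
    (and_nodes.filter (fun p => !(marked.contains (p.1 ++ p.2)))).map
      (fun p => (pvHeuristic p.1 + pvHeuristic p.2 + 2, p.1 ++ p.2)) with hcandsA
  set candsO : List (Int × String) :=
    (or_nodes.filter (fun n => !(marked.contains n))).map
      (fun n => (pvHeuristic n + 1, n)) with hcandsO
  -- letters facts about every candidate
  have hchar : ∀ t ∈ candsA ++ candsO, t.1 < 999999 := by
    intro t ht
    rcases pvCandMem and_nodes or_nodes marked t ht with ⟨p, hp, hm, rfl⟩ | ⟨n, hn, hm, rfl⟩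
    · obtain ⟨h1, h2⟩ := hand p hp hm
      have b1 := pvHeurBound p.1 h1
      have b2 := pvHeurBound p.2 h2
      simp only []
      omega
    · have b1 := pvHeurBound n (hor n hn hm)
      simp only []
      omega
  have hcons : pvConsistent (candsA ++ candsO) := by
    intro t ht u hu hk
    rcases pvCandMem and_nodes or_nodes marked t ht with ⟨p, hp, hm, rfl⟩ | ⟨n, hn, hm, rfl⟩ <;>
      rcases pvCandMem and_nodes or_nodes marked u hu with ⟨q, hq, hm', rfl⟩ | ⟨w, hw, hm', rfl⟩
    · obtain ⟨hp1, hp2⟩ := hand p hp hm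
      obtain ⟨hq1, hq2⟩ := hand q hq hm'
      simp only [] at hk
      obtain ⟨e1, e2⟩ := pvKeyInj (pvLetterChar _ hp1) (pvLetterChar _ hp2)
        (pvLetterChar _ hq1) (pvLetterChar _ hq2) hk
      rw [e1, e2]
    · obtain ⟨hp1, hp2⟩ := hand p hp hm
      simp only [] at hk
      exact absurd hk (pvKeyLen (pvLetterChar _ hp1) (pvLetterChar _ hp2)
        (pvLetterChar _ (hor w hw hm')))
    · obtain ⟨hq1, hq2⟩ := hand q hq hm'
      simp only [] at hk
      exact absurd hk.symm (pvKeyLen (pvLetterChar _ hq1) (pvLetterChar _ hq2)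
        (pvLetterChar _ (hor n hn hm)))
    · simp only [] at hk
      rw [hk]
  -- A's two insert loops build the fold of the candidate list
  have e1 : and_nodes.foldl (fun d p =>
        if !(marked.contains (p.1 ++ p.2)) then
          d.insert (p.1 ++ p.2) (pvHeuristic p.1 + pvHeuristic p.2 + 2)
        else d) PySem.Dict.empty
      = candsA.foldl (fun d t => d.insert t.2 t.1) PySem.Dict.empty :=
    pvFoldFilterMap and_nodes (fun p => !(marked.contains (p.1 ++ p.2)))
      (fun p => (pvHeuristic p.1 + pvHeuristic p.2 + 2, p.1 ++ p.2))
      (fun (d : PySem.Dict String Int) t => d.insert t.2 t.1) PySem.Dict.empty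
  have e2 : ∀ (d0 : PySem.Dict String Int), or_nodes.foldl (fun d n =>
        if !(marked.contains n) then d.insert n (pvHeuristic n + 1) else d) d0
      = candsO.foldl (fun d t => d.insert t.2 t.1) d0 := fun d0 =>
    pvFoldFilterMap or_nodes (fun n => !(marked.contains n))
      (fun n => (pvHeuristic n + 1, n))
      (fun (d : PySem.Dict String Int) t => d.insert t.2 t.1) d0
  -- B's two append loops build the candidate list itself
  have b1 : and_nodes.foldl (fun acc p =>
        if !(marked.contains (p.1 ++ p.2)) then
          acc ++ [(pvHeuristic p.1 + pvHeuristic p.2 + 2, p.1 ++ p.2)]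
        else acc) ([] : List (Int × String)) = candsA := by
    rw [PySem.List.foldl_append_if]; simp only [List.nil_append]; exact hcandsA.symm
  simp only [e1, e2, b1]
  rw [PySem.List.foldl_append_if]
  rw [← List.foldl_append]
  set d2 := (candsA ++ candsO).foldl (fun d t => d.insert t.2 t.1) PySem.Dict.empty with hd2
  have hnd2 : d2.keys.Nodup := by
    rw [hd2]
    exact PySem.Dict.nodup_keys_foldl_insert_key (candsA ++ candsO) (fun t => t.2)
      (fun _ t => t.1) PySem.Dict.empty PySem.Dict.nodup_keys_empty
  -- turn A's key scan into a scan of the swapped items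
  have e3 : d2.keys.foldl (fun acc k =>
        if d2.getD k 0 < acc.1 then (d2.getD k 0, some k) else acc)
        ((999999 : Int), (none : Option String))
      = (d2.items.map pvSw).foldl pvStep ((999999 : Int), (none : Option String)) := by
    rw [PySem.Dict.items_eq_map_keys d2 hnd2 0, List.map_map, List.foldl_map]
    rfl
  rw [e3]
  have e4 := pvDictScan (candsA ++ candsO) PySem.Dict.empty
    ((999999 : Int), (none : Option String)) PySem.Dict.nodup_keys_empty
    (by simpa [PySem.Dict.empty] using hcons)
  have hemp : (PySem.Dict.empty : PySem.Dict String Int).items = [] := rfl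
  rw [← hd2] at e4
  rw [e4, hemp]
  simp only [List.map_nil, List.nil_append]
  exact pvScanEqSorted (candsA ++ candsO) hchar
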